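-- pv_equiv track=rewrite | github.com/varshasahani/DSA | DSA/Graph/bellman.py | count
-- ===== SOURCE A (Python) =====
-- def count(s):
--     hash={}
--     for i in s:
--         if i not in hash:
--             hash[i]=0
--         hash[i]+=1
--     arr=[]
--     for key,value in hash.items():
--         arr.append(value)
--     arr.sort(reverse=True)
--     count=0
--     for i in range(len(arr)):
--         if i<9:
--             count+=arr[i]
--         elif i<18:
--             count+=(arr[i]*2)
--         else:
--             count+=(arr[i]*3)
--     return count
-- ===== SOURCE B (Python) =====
-- def count(s):
--     # Counting-sort approach: bucket the frequency values, then walk the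
--     # buckets from the largest frequency down, assigning tier weights by rank.
--     freq = {}
--     for c in s:
--         freq[c] = freq.get(c, 0) + 1
--     hist = {}
--     mx = 0
--     for v in freq.values():
--         hist[v] = hist.get(v, 0) + 1
--         if v > mx:
--             mx = v
--     result = 3 * len(s)
--     rank = 0
--     for v in range(mx, 0, -1):
--         for _ in range(hist.get(v, 0)):
--             if rank < 9:
--                 result -= 2 * v
--             elif rank < 18:
--                 result -= v
--             rank += 1
--     return result
-- ===== Notes on version B (the rewrite author's own statement) =====
-- stated objective: alternative
-- what changed: B replaces A's comparison sort of the frequency values by a counting-sort bucket walk: it histograms the frequency values, tracks their maximum, and walks buckets from the largest frequency down assigning tier weights by running rank, starting from 3*len(s) and subtracting the tier discounts.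
import Mathlib
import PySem

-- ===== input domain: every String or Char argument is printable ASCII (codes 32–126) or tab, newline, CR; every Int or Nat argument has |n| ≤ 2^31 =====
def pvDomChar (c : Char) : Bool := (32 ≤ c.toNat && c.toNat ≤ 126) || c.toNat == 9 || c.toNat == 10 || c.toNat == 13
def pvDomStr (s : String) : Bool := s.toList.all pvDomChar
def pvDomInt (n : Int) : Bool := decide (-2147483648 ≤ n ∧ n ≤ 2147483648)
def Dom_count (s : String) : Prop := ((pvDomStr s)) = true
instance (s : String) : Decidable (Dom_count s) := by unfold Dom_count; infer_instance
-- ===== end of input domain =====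

-- B replaces A's comparison sort of the frequency values by a counting-sort bucket walk
-- (histogram the frequencies, walk buckets from the maximum down, weight by running rank); objective: alternative.

-- ===== PORT A =====
def count (s : String) : Int :=
  let hash : PySem.Dict Char Int :=
    s.toList.foldl (fun h i =>
      let h := if h.contains i then h else h.insert i 0
      h.insert i (h.getD i 0 + 1)) PySem.Dict.empty
  let arr : List Int := hash.items.foldl (fun arr kv => arr ++ [kv.2]) []
  let arr := PySem.List.sorted arr (fun x => x) true
  (PySem.List.pyRange 0 (arr.length : Int) 1).foldl (fun c i =>
    if i < 9 then c + PySem.List.pyGetD arr i 0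
    else if i < 18 then c + PySem.List.pyGetD arr i 0 * 2
    else c + PySem.List.pyGetD arr i 0 * 3) 0

-- ===== PORT B =====
def count_alt (s : String) : Int :=
  let freq : PySem.Dict Char Int :=
    s.toList.foldl (fun d c => d.insert c (d.getD c 0 + 1)) PySem.Dict.empty
  let hm : PySem.Dict Int Int × Int :=
    freq.values.foldl (fun p v =>
      (p.1.insert v (p.1.getD v 0 + 1), if v > p.2 then v else p.2))
      (PySem.Dict.empty, 0)
  let hist := hm.1
  let mx := hm.2
  let st : Int × Int :=
    (PySem.List.pyRange mx 0 (-1)).foldl (fun st v =>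
      (PySem.List.pyRange 0 (hist.getD v 0) 1).foldl (fun st _ =>
        (if st.2 < 9 then st.1 - 2 * v else if st.2 < 18 then st.1 - v else st.1,
         st.2 + 1)) st)
      (3 * PySem.Str.len s, 0)
  st.1

-- ===== PRECONDITION & SPEC =====
def Spec_count (s : String) (out : Int) : Prop := out = count_alt s
instance (s : String) (out : Int) : Decidable (Spec_count s out) := by unfold Spec_count; infer_instance

-- ===== CLAIM (what is proved, stated in full; the proofs are below) =====
def Claim_equal_count : Prop := ∀ (s : String), Dom_count s → Spec_count s (count s)

-- ===== LEMMAS AND PROOFS =====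

-- ---- A-side: the three-branch index loop over the sorted counts is a closed form ----

theorem pvSumRangeGetD (arr : List Int) (r : Nat) :
    ∑ k ∈ Finset.range r, arr.getD k 0 = (arr.take r).sum := by
  induction r with
  | zero => simp
  | succ r ih =>
    rw [Finset.sum_range_succ, ih, List.take_add_one]
    cases h : arr[r]? with
    | none => simp [List.getD, h]
    | some a => simp [List.getD, h]

theorem pvSumIte (arr : List Int) (n m : Nat) (hn : arr.length ≤ n) :
    ∑ k ∈ Finset.range n, (if k < m then arr.getD k 0 else 0) = (arr.take m).sum := by
  rw [← Finset.sum_filter]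
  have hfil : (Finset.range n).filter (fun k => k < m) = Finset.range (min m n) := by
    ext k; simp; omega
  rw [hfil, pvSumRangeGetD]
  by_cases h : m ≤ n
  · rw [Nat.min_eq_left h]
  · rw [Nat.min_eq_right (by omega), List.take_of_length_le hn,
      List.take_of_length_le (by omega)]

theorem pvWeighted (arr : List Int) :
    (PySem.List.pyRange 0 (arr.length : Int) 1).foldl (fun c i =>
      if i < 9 then c + PySem.List.pyGetD arr i 0
      else if i < 18 then c + PySem.List.pyGetD arr i 0 * 2
      else c + PySem.List.pyGetD arr i 0 * 3) 0
    = 3 * arr.sum - (arr.take 18).sum - (arr.take 9).sum := by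
  have hstep : (fun (c : Int) (i : Int) =>
      if i < 9 then c + PySem.List.pyGetD arr i 0
      else if i < 18 then c + PySem.List.pyGetD arr i 0 * 2
      else c + PySem.List.pyGetD arr i 0 * 3)
      = (fun c i => c + (if i < 9 then PySem.List.pyGetD arr i 0
          else if i < 18 then PySem.List.pyGetD arr i 0 * 2
          else PySem.List.pyGetD arr i 0 * 3)) := by
    funext c i; split_ifs <;> rfl
  rw [hstep, PySem.List.foldl_add, PySem.List.pyRange_one, List.map_map]
  have h1 : ((arr.length : Int) - 0).toNat = arr.length := by omega
  rw [h1]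
  have h2 : ∀ k ∈ List.range arr.length,
      ((fun i => if i < 9 then PySem.List.pyGetD arr i 0
         else if i < 18 then PySem.List.pyGetD arr i 0 * 2
         else PySem.List.pyGetD arr i 0 * 3) ∘ fun k : Nat => (0 : Int) + k) k
      = 3 * arr.getD k 0 - (if k < 18 then arr.getD k 0 else 0)
        - (if k < 9 then arr.getD k 0 else 0) := by
    intro k _
    simp only [Function.comp, zero_add, PySem.List.pyGetD_natCast]
    have c9 : ((k : Int) < 9) ↔ k < 9 := by omega
    have c18 : ((k : Int) < 18) ↔ k < 18 := by omega
    simp only [c9, c18]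
    split_ifs <;> first | ring1 | omega
  rw [List.map_congr_left h2]
  have h3 : (List.map (fun k => 3 * arr.getD k 0 - (if k < 18 then arr.getD k 0 else 0)
      - (if k < 9 then arr.getD k 0 else 0)) (List.range arr.length)).sum
      = ∑ k ∈ Finset.range arr.length, (3 * arr.getD k 0 - (if k < 18 then arr.getD k 0 else 0)
      - (if k < 9 then arr.getD k 0 else 0)) := rfl
  rw [h3]
  rw [Finset.sum_sub_distrib, Finset.sum_sub_distrib, ← Finset.mul_sum]
  rw [pvSumRangeGetD, pvSumIte arr _ 18 le_rfl, pvSumIte arr _ 9 le_rfl,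
    List.take_of_length_le le_rfl]
  ring

theorem pvValuesSum (l : List Char) :
    ((PySem.Dict.counter l).values).sum = (l.length : Int) := by
  have hv : (PySem.Dict.counter l).values
      = (PySem.Set.ofList l).map (fun k => (l.count k : Int)) := by
    simp only [PySem.Dict.values, PySem.Dict.items_counter, List.map_map]
    rfl
  rw [hv]
  have hperm : (PySem.Set.ofList l).Perm l.dedup := by
    rw [List.perm_ext_iff_of_nodup (PySem.Set.nodup_ofList l) l.nodup_dedup]
    intro a; rw [PySem.Set.mem_ofList, List.mem_dedup]
  rw [(hperm.map (fun k => (l.count k : Int))).sum_eq]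
  have : (l.dedup.map (fun k => (l.count k : Int))).sum
      = ((l.dedup.map (fun k => l.count k)).sum : Int) := by
    rw [Nat.cast_list_sum, List.map_map]; rfl
  rw [this, List.sum_map_count_dedup_eq_length]

theorem pvDictEq (l : List Char) :
    l.foldl (fun h i =>
      let h := if h.contains i then h else h.insert i 0
      h.insert i (h.getD i 0 + 1)) PySem.Dict.empty
    = PySem.Dict.counter l := by
  rw [← PySem.Dict.foldl_insert_getD_add_one_eq_counter]
  have hfun : (fun (h : PySem.Dict Char Int) i =>
      let h := if h.contains i then h else h.insert i 0
      h.insert i (h.getD i 0 + 1))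
      = (fun d c => d.insert c (d.getD c 0 + 1)) := by
    funext h i
    by_cases hc : h.contains i
    · simp [hc]
    · simp only [hc, Bool.false_eq_true, if_false]
      rw [PySem.Dict.getD_insert_self, PySem.Dict.insert_insert_self,
        PySem.Dict.getD_of_not_contains _ _ (by simpa using hc)]
  rw [hfun]

-- ---- B-side: the tier step and the weight it subtracts ----

def pvTier (st : Int × Int) (w : Int) : Int × Int :=
  (if st.2 < 9 then st.1 - 2 * w else if st.2 < 18 then st.1 - w else st.1, st.2 + 1)

def pvWS : List Int → Int → Int
  | [], _ => 0
  | w :: t, r => (if r < 9 then 2 * w else if r < 18 then w else 0) + pvWS t (r + 1)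

theorem pvFoldIgnore (v : Int) : ∀ (l : List Int) (init : Int × Int),
    l.foldl (fun st _ => pvTier st v) init
      = (List.replicate l.length v).foldl pvTier init := by
  intro l
  induction l with
  | nil => intro init; rfl
  | cons x t ih =>
    intro init
    simp only [List.foldl_cons, List.length_cons, List.replicate_succ, ih]

theorem pvTierFold : ∀ (L : List Int) (st : Int × Int),
    L.foldl pvTier st = (st.1 - pvWS L st.2, st.2 + L.length) := by
  intro L
  induction L with
  | nil => intro st; simp [pvWS]
  | cons w t ih =>
    intro st
    simp only [List.foldl_cons, ih, pvWS, pvTier, List.length_cons, Prod.mk.injEq]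
    refine ⟨?_, by push_cast; ring⟩
    split_ifs <;> ring

theorem pvWSphases : ∀ (L : List Int) (r : Int), 0 ≤ r →
    pvWS L r = 2 * ((L.take (9 - r).toNat).sum)
      + ((L.drop (9 - r).toNat).take (18 - max r 9).toNat).sum := by
  intro L
  induction L with
  | nil => intro r _; simp [pvWS]
  | cons w t ih =>
    intro r hr
    rw [pvWS, ih (r + 1) (by omega)]
    by_cases h9 : r < 9
    · have e1 : (9 - r).toNat = (9 - (r + 1)).toNat + 1 := by omega
      have e2 : (18 - max r 9).toNat = (18 - max (r + 1) 9).toNat := by omega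
      rw [if_pos h9, e1, e2, List.take_succ_cons, List.drop_succ_cons, List.sum_cons]
      ring
    · by_cases h18 : r < 18
      · have e1 : (9 - r).toNat = 0 := by omega
        have e2 : (9 - (r + 1)).toNat = 0 := by omega
        have e3 : (18 - max r 9).toNat = (18 - max (r + 1) 9).toNat + 1 := by omega
        rw [if_neg h9, if_pos h18, e1, e2, e3, List.take_zero, List.take_zero,
          List.drop_zero, List.drop_zero, List.take_succ_cons, List.sum_cons]
        ring
      · have e1 : (9 - r).toNat = 0 := by omega
        have e2 : (9 - (r + 1)).toNat = 0 := by omega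
        have e3 : (18 - max r 9).toNat = 0 := by omega
        have e4 : (18 - max (r + 1) 9).toNat = 0 := by omega
        rw [if_neg h9, if_neg h18, e1, e2, e3, e4]
        simp

-- ---- B-side: the bucket list walked from the maximum down ----

def pvBN (vals : List Int) : Nat → List Int
  | 0 => []
  | n + 1 =>
      List.replicate (((PySem.Dict.counter vals).getD ((n : Int) + 1) 0).toNat) ((n : Int) + 1)
        ++ pvBN vals n

theorem pvBN_eq_range (vals : List Int) : ∀ (n : Nat),
    (PySem.List.pyRange (n : Int) 0 (-1)).flatMap
      (fun w => List.replicate (((PySem.Dict.counter vals).getD w 0).toNat) w)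
    = pvBN vals n := by
  intro n
  induction n with
  | zero => simp [PySem.List.pyRange_neg_one_eq_nil, pvBN]
  | succ n ih =>
    rw [show ((n + 1 : Nat) : Int) = (n : Int) + 1 by push_cast; ring]
    rw [PySem.List.pyRange_neg_one_cons (by omega)]
    simp only [List.flatMap_cons, pvBN]
    rw [show (n : Int) + 1 - 1 = (n : Int) by ring, ih]

theorem pvBN_mem (vals : List Int) : ∀ (n : Nat) (w : Int),
    w ∈ pvBN vals n → 1 ≤ w ∧ w ≤ n := by
  intro n
  induction n with
  | zero => intro w hw; simp [pvBN] at hw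
  | succ n ih =>
    intro w hw
    rcases List.mem_append.mp hw with h | h
    · have := (List.eq_of_mem_replicate h); omega
    · have := ih w h; omega

theorem pvBN_pairwise (vals : List Int) : ∀ (n : Nat),
    (pvBN vals n).Pairwise (fun a b => b ≤ a) := by
  intro n
  induction n with
  | zero => simp [pvBN]
  | succ n ih =>
    rw [pvBN, List.pairwise_append]
    refine ⟨List.pairwise_replicate.mpr (Or.inr le_rfl), ih, ?_⟩
    intro x hx y hy
    have hxe := List.eq_of_mem_replicate hx
    have := pvBN_mem vals n y hy
    omega

theorem pvBN_count (vals : List Int) : ∀ (n : Nat) (w : Int),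
    (pvBN vals n).count w = if 1 ≤ w ∧ w ≤ (n : Int) then vals.count w else 0 := by
  intro n
  induction n with
  | zero => intro w; simp [pvBN]; omega
  | succ n ih =>
    intro w
    rw [pvBN, List.count_append, List.count_replicate, ih]
    by_cases he : ((n : Int) + 1) = w
    · rw [if_pos (beq_iff_eq.mpr he), if_neg (by omega), if_pos (by push_cast; omega)]
      rw [← he, PySem.Dict.getD_counter]
      omega
    · rw [if_neg (by simpa using he)]
      by_cases hin : 1 ≤ w ∧ w ≤ (n : Int)
      · rw [if_pos hin, if_pos (by push_cast; omega)]
        omega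
      · rw [if_neg hin, if_neg (by push_cast; omega)]

theorem pvValsPos (l : List Char) :
    ∀ v ∈ (PySem.Dict.counter l).values, 1 ≤ v := by
  intro v hv
  rw [PySem.Dict.values_eq_map_keys _ (PySem.Dict.nodup_keys_counter l) 0] at hv
  rcases List.mem_map.mp hv with ⟨k, hk, rfl⟩
  rw [PySem.Dict.keys_counter, PySem.Set.mem_ofList] at hk
  rw [PySem.Dict.getD_counter]
  have : 1 ≤ l.count k := List.one_le_count_iff.mpr hk
  omega

-- the bucket list IS the reverse-sorted value list
theorem pvBN_eq_sorted (vals : List Int) (hpos : ∀ v ∈ vals, 1 ≤ v) :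
    pvBN vals (vals.foldl max 0).toNat = PySem.List.sorted vals (fun x => x) true := by
  have hmax := PySem.List.le_foldl_max vals 0
  set mx := vals.foldl max 0 with hmx
  have hmx0 : 0 ≤ mx := hmax.1
  have hperm : (pvBN vals mx.toNat).Perm vals := by
    rw [List.perm_iff_count]
    intro w
    rw [pvBN_count]
    by_cases hin : 1 ≤ w ∧ w ≤ (mx.toNat : Int)
    · rw [if_pos hin]
    · rw [if_neg hin]
      symm
      rw [List.count_eq_zero]
      intro hmem
      have h1 := hpos w hmem
      have h2 := hmax.2 w hmem
      omega
  -- both lists are permutations of vals and sorted in decreasing order, hence equal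
  have h1 : (pvBN vals mx.toNat).reverse.Pairwise (fun a b : Int => a ≤ b) := by
    rw [List.pairwise_reverse]
    exact pvBN_pairwise vals mx.toNat
  have h2 : (PySem.List.sorted vals (fun x => x) true).reverse.Pairwise
      (fun a b : Int => a ≤ b) := by
    rw [List.pairwise_reverse]
    exact PySem.List.sorted_pairwise_rev vals (fun x => x)
  have hperm2 : (pvBN vals mx.toNat).reverse.Perm
      (PySem.List.sorted vals (fun x => x) true).reverse := by
    refine (((pvBN vals mx.toNat).reverse_perm.trans hperm).trans ?_)
    exact ((PySem.List.sorted_perm vals (fun x => x) true).symm).trans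
      (PySem.List.sorted vals (fun x => x) true).reverse_perm.symm
  have := PySem.List.eq_of_perm_of_pairwise_le_of_injective (fun x : Int => x)
    (fun a b h => h) hperm2 h1 h2
  exact List.reverse_inj.mp this

-- ---- the main equation ----

theorem count_eq (s : String) : count s = count_alt s := by
  unfold count count_alt
  simp only [pvDictEq, PySem.Dict.foldl_insert_getD_add_one_eq_counter]
  have harr : (PySem.Dict.counter s.toList).items.foldl (fun arr kv => arr ++ [kv.2]) []
      = (PySem.Dict.counter s.toList).values := by
    rw [PySem.List.foldl_append_singleton_eq_map]
    rfl
  rw [harr, pvWeighted]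
  set vals := (PySem.Dict.counter s.toList).values with hvals
  -- B side: split the paired fold, identify hist and mx
  have hsplit : vals.foldl (fun (p : PySem.Dict Int Int × Int) (v : Int) =>
        (p.1.insert v (p.1.getD v 0 + 1), if v > p.2 then v else p.2))
        ((PySem.Dict.empty : PySem.Dict Int Int), (0 : Int))
      = (vals.foldl (fun d v => d.insert v (d.getD v 0 + 1)) PySem.Dict.empty,
         vals.foldl (fun m v => if v > m then v else m) 0) :=
    PySem.List.foldl_prod_mk (fun (d : PySem.Dict Int Int) (v : Int) => d.insert v (d.getD v 0 + 1))
      (fun (m v : Int) => if v > m then v else m) vals _ _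
  simp only [hsplit]
  rw [PySem.Dict.foldl_insert_getD_add_one_eq_counter]
  have hmaxfun : vals.foldl (fun m v => if v > m then v else m) 0 = vals.foldl max 0 := by
    apply PySem.List.foldl_congr_mem
    intro m v _
    by_cases h : v > m
    · rw [if_pos h, max_eq_right h.le]
    · rw [if_neg h, max_eq_left (by omega)]
  rw [hmaxfun]
  set mx := vals.foldl max 0 with hmx
  have hmx0 : 0 ≤ mx := (PySem.List.le_foldl_max vals 0).1
  -- the inner ignored-variable loops fold the bucket list
  have hinner : ∀ (st : Int × Int) (v : Int),
      (PySem.List.pyRange 0 ((PySem.Dict.counter vals).getD v 0) 1).foldl (fun st _ =>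
        (if st.2 < 9 then st.1 - 2 * v else if st.2 < 18 then st.1 - v else st.1,
         st.2 + 1)) st
      = (List.replicate (((PySem.Dict.counter vals).getD v 0).toNat) v).foldl pvTier st := by
    intro st v
    have hfun : (fun (st : Int × Int) (_ : Int) =>
        (if st.2 < 9 then st.1 - 2 * v else if st.2 < 18 then st.1 - v else st.1, st.2 + 1))
        = (fun (st : Int × Int) (_ : Int) => pvTier st v) := rfl
    rw [hfun, pvFoldIgnore v, PySem.List.length_pyRange_one,
      show ((PySem.Dict.counter vals).getD v 0 - 0).toNat
        = ((PySem.Dict.counter vals).getD v 0).toNat from by omega]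
  have houter : (PySem.List.pyRange mx 0 (-1)).foldl (fun st v =>
      (PySem.List.pyRange 0 ((PySem.Dict.counter vals).getD v 0) 1).foldl (fun st _ =>
        (if st.2 < 9 then st.1 - 2 * v else if st.2 < 18 then st.1 - v else st.1,
         st.2 + 1)) st) (3 * PySem.Str.len s, 0)
      = (pvBN vals mx.toNat).foldl pvTier (3 * PySem.Str.len s, 0) := by
    have hcong : (PySem.List.pyRange mx 0 (-1)).foldl (fun st v =>
        (PySem.List.pyRange 0 ((PySem.Dict.counter vals).getD v 0) 1).foldl (fun st _ =>
          (if st.2 < 9 then st.1 - 2 * v else if st.2 < 18 then st.1 - v else st.1,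
           st.2 + 1)) st) (3 * PySem.Str.len s, 0)
        = (PySem.List.pyRange mx 0 (-1)).foldl (fun st v =>
          (List.replicate (((PySem.Dict.counter vals).getD v 0).toNat) v).foldl pvTier st)
          (3 * PySem.Str.len s, 0) := by
      apply PySem.List.foldl_congr_mem
      intro st v _
      exact hinner st v
    refine Eq.trans hcong ?_
    rw [← List.foldl_flatMap]
    conv_lhs => rw [show mx = ((mx.toNat : Int)) from by omega]
    rw [pvBN_eq_range vals mx.toNat]
  rw [houter, pvTierFold]
  -- identify the bucket list with the sorted list and finish arithmetically
  rw [pvBN_eq_sorted vals (pvValsPos s.toList)]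
  set v := PySem.List.sorted vals (fun x => x) true with hv
  have hsum : v.sum = (s.toList.length : Int) := by
    rw [(PySem.List.sorted_perm _ _ _).sum_eq, hvals, pvValuesSum]
  have hlen : PySem.Str.len s = (s.toList.length : Int) := PySem.Str.len_eq s
  rw [pvWSphases v 0 le_rfl]
  have e1 : ((9 : Int) - 0).toNat = 9 := by omega
  have e2 : ((18 : Int) - max 0 9).toNat = 9 := by omega
  rw [e1, e2]
  have h18 : v.take 18 = v.take 9 ++ (v.drop 9).take 9 := by
    rw [show (18:Nat) = 9 + 9 from rfl, List.take_add]
  rw [h18, List.sum_append, hsum, hlen]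
  ring

-- ===== VERDICT (by name: the statement is the Claim_ definition above) =====
theorem count_spec : Claim_equal_count := by
  intro s _
  unfold Spec_count
  exact count_eq s
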